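-- pv_equiv track=rewrite | github.com/rager306/law-nexus | scripts/prove-m002-s04-minimax-pyo3.py | payload_status
-- ===== SOURCE A (Python) =====
-- from typing import Any, Literal, Protocol, cast
--
-- Status = Literal[
--     "confirmed-runtime",
--     "blocked-credential",
--     "blocked-environment",
--     "failed-runtime",
-- ]
--
-- def payload_status(findings: list[dict[str, Any]]) -> Status:
--     statuses = [finding.get("status") for finding in findings]
--     if "failed-runtime" in statuses:
--         return "failed-runtime"
--     if "blocked-environment" in statuses:
--         return "blocked-environment"
--     if "blocked-credential" in statuses:
--         return "blocked-credential"
--     return "confirmed-runtime"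
-- ===== SOURCE B (Python) =====
-- def _rank(status):
--     if status == "failed-runtime":
--         return 0
--     if status == "blocked-environment":
--         return 1
--     if status == "blocked-credential":
--         return 2
--     return 3
--
--
-- _NAMES = ("failed-runtime", "blocked-environment", "blocked-credential", "confirmed-runtime")
--
--
-- def payload_status(findings):
--     best = 3
--     for finding in findings:
--         r = _rank(finding.get("status"))
--         if r < best:
--             best = r
--     return _NAMES[best]
-- ===== Notes on version B (the rewrite author's own statement) =====
-- stated objective: alternative
-- what changed: Replaces three successive membership scans over a prebuilt status list by a single pass that keeps the minimum priority rank (failed=0, env=1, cred=2, other/None=3) and maps the winning rank back to a status name.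
import Mathlib
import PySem

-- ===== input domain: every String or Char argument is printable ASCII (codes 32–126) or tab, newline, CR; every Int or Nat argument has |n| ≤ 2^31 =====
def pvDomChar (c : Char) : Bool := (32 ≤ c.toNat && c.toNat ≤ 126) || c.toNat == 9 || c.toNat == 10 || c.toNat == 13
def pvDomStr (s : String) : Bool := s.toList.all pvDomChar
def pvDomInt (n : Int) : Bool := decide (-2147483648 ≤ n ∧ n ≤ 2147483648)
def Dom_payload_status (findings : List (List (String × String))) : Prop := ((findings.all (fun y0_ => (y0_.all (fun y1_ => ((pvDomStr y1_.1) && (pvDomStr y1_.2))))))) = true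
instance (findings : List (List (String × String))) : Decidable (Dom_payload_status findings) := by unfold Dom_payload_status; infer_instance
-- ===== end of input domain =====

-- B: a single minimum-rank pass instead of A's three membership scans (equal return value; objective: alternative).
-- ===== PORT A =====
-- finding.get("status"): first-match lookup in the association list (exact for a Python dict)
def pvGetStatus (finding : List (String × String)) : Option String :=
  (finding.find? (fun kv => kv.1 == "status")).map (·.2)

def payload_status (findings : List (List (String × String))) : String :=
  let statuses := findings.map (fun finding => pvGetStatus finding)
  if some "failed-runtime" ∈ statuses then "failed-runtime"
  else if some "blocked-environment" ∈ statuses then "blocked-environment"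
  else if some "blocked-credential" ∈ statuses then "blocked-credential"
  else "confirmed-runtime"

-- ===== PORT B =====
def pvRank (status : Option String) : Nat :=
  if status = some "failed-runtime" then 0
  else if status = some "blocked-environment" then 1
  else if status = some "blocked-credential" then 2
  else 3

-- _NAMES[best]; best is always 0..3, so the tuple index is total here
def pvName (best : Nat) : String :=
  match best with
  | 0 => "failed-runtime"
  | 1 => "blocked-environment"
  | 2 => "blocked-credential"
  | _ => "confirmed-runtime"

def pvBest (findings : List (List (String × String))) : Nat :=
  findings.foldl (fun best finding =>
    let r := pvRank (pvGetStatus finding)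
    if r < best then r else best) 3

def payload_status_alt (findings : List (List (String × String))) : String :=
  pvName (pvBest findings)

-- ===== PRECONDITION & SPEC =====
def Spec_payload_status (findings : List (List (String × String))) (out : String) : Prop := out = payload_status_alt findings
instance (findings : List (List (String × String))) (out : String) : Decidable (Spec_payload_status findings out) := by unfold Spec_payload_status; infer_instance

-- ===== CLAIM (what is proved, stated in full; the proofs are below) =====
def Claim_equal_payload_status : Prop := ∀ (findings : List (List (String × String))), Dom_payload_status findings → Spec_payload_status findings (payload_status findings)

-- ===== LEMMAS AND PROOFS =====

def pvF (b : Nat) (l : List (List (String × String))) : Nat :=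
  l.foldl (fun best finding => min best (pvRank (pvGetStatus finding))) b

lemma pvRank_le (s : Option String) : pvRank s ≤ 3 := by
  unfold pvRank; split_ifs <;> omega

lemma pvStep_min (b r : Nat) : (if r < b then r else b) = min b r := by
  rw [Nat.min_def]; split_ifs <;> omega

lemma pvBest_eq (l : List (List (String × String))) : pvBest l = pvF 3 l := by
  simp only [pvBest, pvF, pvStep_min]

lemma pvF_base (l : List (List (String × String))) (b : Nat) (hb : b ≤ 3) :
    pvF b l = min b (pvF 3 l) := by
  induction l generalizing b with
  | nil => simp only [pvF, List.foldl_nil]; omega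
  | cons f l ih =>
    have hr := pvRank_le (pvGetStatus f)
    simp only [pvF, List.foldl_cons] at *
    rw [ih (min b (pvRank (pvGetStatus f))) (by omega),
        ih (min 3 (pvRank (pvGetStatus f))) (by omega)]
    omega

lemma pvBest_cons (f : List (String × String)) (l : List (List (String × String))) :
    pvBest (f :: l) = min (pvRank (pvGetStatus f)) (pvBest l) := by
  have hr := pvRank_le (pvGetStatus f)
  rw [pvBest_eq, pvBest_eq]
  show pvF (min 3 (pvRank (pvGetStatus f))) l = _
  rw [pvF_base _ _ (by omega)]
  omega

lemma pvBest_le_iff (l : List (List (String × String))) (k : Nat) (hk : k < 3) :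
    pvBest l ≤ k ↔ ∃ f ∈ l, pvRank (pvGetStatus f) ≤ k := by
  induction l with
  | nil => simp [pvBest]; omega
  | cons f l ih =>
    rw [pvBest_cons]
    simp only [List.mem_cons]
    constructor
    · intro h
      rcases min_le_iff.mp h with h | h
      · exact ⟨f, Or.inl rfl, h⟩
      · obtain ⟨g, hg, hgk⟩ := ih.mp h
        exact ⟨g, Or.inr hg, hgk⟩
    · rintro ⟨g, (rfl | hg), hgk⟩
      · exact le_trans (min_le_left _ _) hgk
      · exact le_trans (min_le_right _ _) (ih.mpr ⟨g, hg, hgk⟩)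

lemma pvRank_le0 (s : Option String) : pvRank s ≤ 0 ↔ s = some "failed-runtime" := by
  unfold pvRank; split_ifs <;> simp_all

lemma pvRank_le1 (s : Option String) :
    pvRank s ≤ 1 ↔ s = some "failed-runtime" ∨ s = some "blocked-environment" := by
  unfold pvRank; split_ifs <;> simp_all

lemma pvRank_le2 (s : Option String) :
    pvRank s ≤ 2 ↔ s = some "failed-runtime" ∨ s = some "blocked-environment" ∨
      s = some "blocked-credential" := by
  unfold pvRank; split_ifs <;> simp_all

lemma pvBest_le_three (l : List (List (String × String))) : pvBest l ≤ 3 := by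
  induction l with
  | nil => simp [pvBest]
  | cons f l ih =>
    rw [pvBest_cons]
    exact le_trans (min_le_right _ _) ih

lemma pv_mem_iff (l : List (List (String × String))) (s : String) :
    (some s ∈ l.map (fun finding => pvGetStatus finding)) ↔
      ∃ f ∈ l, pvGetStatus f = some s := by
  simp

-- ===== VERDICT (by name: the statement is the Claim_ definition above) =====
theorem payload_status_spec : Claim_equal_payload_status := by
  intro findings _
  show payload_status findings = payload_status_alt findings
  simp only [payload_status, payload_status_alt]
  have h3 := pvBest_le_three findings
  split_ifs with h0 h1 h2
  · have : pvBest findings ≤ 0 := by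
      rw [pvBest_le_iff _ _ (by omega)]
      obtain ⟨f, hf, hs⟩ := (pv_mem_iff _ _).mp h0
      exact ⟨f, hf, (pvRank_le0 _).mpr hs⟩
    have h : pvBest findings = 0 := by omega
    rw [h]; rfl
  · have hle : pvBest findings ≤ 1 := by
      rw [pvBest_le_iff _ _ (by omega)]
      obtain ⟨f, hf, hs⟩ := (pv_mem_iff _ _).mp h1
      exact ⟨f, hf, (pvRank_le1 _).mpr (Or.inr hs)⟩
    have hne : ¬ pvBest findings ≤ 0 := by
      rw [pvBest_le_iff _ _ (by omega)]
      rintro ⟨f, hf, hs⟩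
      exact h0 ((pv_mem_iff _ _).mpr ⟨f, hf, (pvRank_le0 _).mp hs⟩)
    have h : pvBest findings = 1 := by omega
    rw [h]; rfl
  · have hle : pvBest findings ≤ 2 := by
      rw [pvBest_le_iff _ _ (by omega)]
      obtain ⟨f, hf, hs⟩ := (pv_mem_iff _ _).mp h2
      exact ⟨f, hf, (pvRank_le2 _).mpr (Or.inr (Or.inr hs))⟩
    have hne : ¬ pvBest findings ≤ 1 := by
      rw [pvBest_le_iff _ _ (by omega)]
      rintro ⟨f, hf, hs⟩
      rcases (pvRank_le1 _).mp hs with h | h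
      · exact h0 ((pv_mem_iff _ _).mpr ⟨f, hf, h⟩)
      · exact h1 ((pv_mem_iff _ _).mpr ⟨f, hf, h⟩)
    have h : pvBest findings = 2 := by omega
    rw [h]; rfl
  · have hne : ¬ pvBest findings ≤ 2 := by
      rw [pvBest_le_iff _ _ (by omega)]
      rintro ⟨f, hf, hs⟩
      rcases (pvRank_le2 _).mp hs with h | h | h
      · exact h0 ((pv_mem_iff _ _).mpr ⟨f, hf, h⟩)
      · exact h1 ((pv_mem_iff _ _).mpr ⟨f, hf, h⟩)
      · exact h2 ((pv_mem_iff _ _).mpr ⟨f, hf, h⟩)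
    have h : pvBest findings = 3 := by omega
    rw [h]; rfl
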